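-- pv_equiv track=rewrite | github.com/veb-101/Coding-Practice-Problems | CodeSignal Challenges/challenge_22.py | increasingNumber
-- ===== SOURCE A (Python) =====
-- def increasingNumber(x, n):
--     for i in range(1, n + 1):
--         for j in range(i + 1):
--             x += j
--             if x % i == 0:
--                 break
--             else:
--                 x -= j
--     return x
-- ===== SOURCE B (Python) =====
-- def increasingNumber(x, n):
--     # B: compute each step's increment directly via modulo (O(n) vs A's O(n^2))
--     for i in range(1, n + 1):
--         x += (-x) % i
--     return x
-- ===== Notes on version B (the rewrite author's own statement) =====
-- stated objective: faster
-- what changed: Replaces the inner trial loop over j (add j, test divisibility, undo) with the direct increment (-x) % i, turning the nested O(n^2) scan into a single O(n) pass.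
import Mathlib
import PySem

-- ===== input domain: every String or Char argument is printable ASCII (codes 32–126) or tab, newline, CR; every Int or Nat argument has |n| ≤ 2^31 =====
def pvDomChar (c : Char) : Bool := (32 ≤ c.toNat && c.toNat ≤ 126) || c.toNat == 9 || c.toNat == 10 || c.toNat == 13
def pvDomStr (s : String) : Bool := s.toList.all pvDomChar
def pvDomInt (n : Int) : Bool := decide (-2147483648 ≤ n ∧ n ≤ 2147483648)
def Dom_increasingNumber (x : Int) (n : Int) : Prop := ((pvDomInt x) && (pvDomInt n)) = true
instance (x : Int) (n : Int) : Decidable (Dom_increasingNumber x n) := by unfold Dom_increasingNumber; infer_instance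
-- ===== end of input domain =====

-- B replaces A's inner trial loop over j with the direct increment (-x) % i: O(n) instead of O(n^2).

-- ===== PORT A =====
-- inner 'for j in …: x += j; if x % i == 0: break; else: x -= j' — net: first j with (x+j)%i==0 yields x+j, else x
def pvInnerA (i : Int) (x : Int) : List Int → Int
  | [] => x
  | j :: rest => if PySem.Int.mod (x + j) i = 0 then x + j else pvInnerA i x rest

def increasingNumber (x : Int) (n : Int) : Int :=
  (PySem.List.pyRange 1 (n + 1) 1).foldl
    (fun x i => pvInnerA i x (PySem.List.pyRange 0 (i + 1) 1)) x

-- ===== PORT B =====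
def increasingNumber_alt (x : Int) (n : Int) : Int :=
  (PySem.List.pyRange 1 (n + 1) 1).foldl (fun x i => x + PySem.Int.mod (-x) i) x

-- ===== PRECONDITION & SPEC =====
def Spec_increasingNumber (x : Int) (n : Int) (out : Int) : Prop := out = increasingNumber_alt x n
instance (x : Int) (n : Int) (out : Int) : Decidable (Spec_increasingNumber x n out) := by unfold Spec_increasingNumber; infer_instance

-- ===== CLAIM (what is proved, stated in full; the proofs are below) =====
def Claim_equal_increasingNumber : Prop := ∀ (x : Int) (n : Int), Dom_increasingNumber x n → Spec_increasingNumber x n (increasingNumber x n)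

-- ===== LEMMAS AND PROOFS =====

-- skipping a prefix on which the break condition never fires
theorem pvInnerA_skip (i x : Int) (l₁ l₂ : List Int)
    (h : ∀ j ∈ l₁, ¬ PySem.Int.mod (x + j) i = 0) :
    pvInnerA i x (l₁ ++ l₂) = pvInnerA i x l₂ := by
  induction l₁ with
  | nil => rfl
  | cons j rest ih =>
      simp only [List.cons_append, pvInnerA, if_neg (h j (List.mem_cons_self))]
      exact ih (fun j hj => h j (List.mem_cons_of_mem _ hj))

-- one step of A equals one step of B (for i ≥ 1)
theorem pvInnerA_step (i x : Int) (hi : 1 ≤ i) :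
    pvInnerA i x (PySem.List.pyRange 0 (i + 1) 1) = x + PySem.Int.mod (-x) i := by
  have hipos : 0 < i := hi
  set r := PySem.Int.mod (-x) i with hr
  have hr0 : 0 ≤ r := PySem.Int.mod_nonneg _ hipos
  have hrlt : r < i := PySem.Int.mod_lt _ hipos
  have hre : r = (-x) % i := by rw [hr, PySem.Int.mod_eq_emod_of_pos hipos]
  have hdvd : PySem.Int.mod (x + r) i = 0 := by
    rw [PySem.Int.mod_eq_zero_iff_dvd, hre, Int.emod_def]
    exact ⟨-((-x) / i), by ring⟩
  have hnot : ∀ j ∈ PySem.List.pyRange 0 r 1, ¬ PySem.Int.mod (x + j) i = 0 := by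
    intro j hj hmod
    have hjb := (PySem.List.mem_pyRange_one).1 hj
    have h1 : i ∣ x + j := (PySem.Int.mod_eq_zero_iff_dvd _ _).1 hmod
    have h2 : i ∣ x + r := (PySem.Int.mod_eq_zero_iff_dvd _ _).1 hdvd
    have h3 : i ∣ r - j := by
      have := dvd_sub h2 h1; simpa using this
    have := Int.le_of_dvd (by omega) h3
    omega
  rw [PySem.List.pyRange_one_append 0 r (i + 1) hr0 (by omega),
      pvInnerA_skip i x _ _ hnot,
      PySem.List.pyRange_one_cons (by omega : r < i + 1)]
  simp [pvInnerA, hdvd]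

theorem increasingNumber_spec : Claim_equal_increasingNumber := by
  intro x n _
  unfold Spec_increasingNumber increasingNumber increasingNumber_alt
  exact PySem.List.foldl_congr_mem (init := x) (h := fun acc i hi => pvInnerA_step i acc ((PySem.List.mem_pyRange_one).1 hi).1)
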